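-- pv_equiv track=rewrite | github.com/AlexeiVartoumian/algorithmicProblems | HackerRank/array/stockMaximise.py | bigprofit
-- ===== SOURCE A (Python) =====
-- def bigprofit(n, prices):
--
--     indexes= {}
--
--     for i in range(len(prices)-1):
--
--         maxprofitsofar  = 0
--         for j in range(i+1, len(prices)):
--
--             maxprofitsofar = max(maxprofitsofar, prices[j] - prices[i])
--
--
--         indexes[i] = maxprofitsofar
--     totalsum = 0
--     for i,x in indexes.items():
--         totalsum+=x
--
--     return totalsum
-- ===== SOURCE B (Python) =====
-- def bigprofit(n, prices):
--     # single right-to-left pass keeping the running suffix maximum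
--     total = 0
--     suffmax = None
--     for p in reversed(prices):
--         if suffmax is not None:
--             total += max(0, suffmax - p)
--             suffmax = max(suffmax, p)
--         else:
--             suffmax = p
--     return total
-- ===== Notes on version B (the rewrite author's own statement) =====
-- stated objective: faster
-- what changed: Replaced the quadratic per-index rescan of all later prices (collected in a dict and summed) by one right-to-left pass that maintains the running suffix maximum and accumulates max(0, suffmax - p) directly.
import Mathlib
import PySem

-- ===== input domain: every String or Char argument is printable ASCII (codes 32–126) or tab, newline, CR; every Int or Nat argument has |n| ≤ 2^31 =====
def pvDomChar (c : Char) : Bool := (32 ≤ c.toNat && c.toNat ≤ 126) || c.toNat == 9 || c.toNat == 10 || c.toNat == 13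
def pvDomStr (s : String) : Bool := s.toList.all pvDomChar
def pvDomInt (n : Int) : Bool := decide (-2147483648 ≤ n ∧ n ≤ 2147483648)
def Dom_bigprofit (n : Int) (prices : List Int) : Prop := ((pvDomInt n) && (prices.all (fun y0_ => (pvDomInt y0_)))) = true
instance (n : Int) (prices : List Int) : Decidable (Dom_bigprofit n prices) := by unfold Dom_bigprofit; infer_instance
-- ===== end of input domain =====

-- B replaces A's quadratic per-index rescan with one right-to-left pass over a suffix maximum (faster, asymptotic).


-- ===== PORT A =====
-- prices[i] / prices[j] are always in range here (0 ≤ i < j < len), so pyGetD with default 0 is exact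
def bigprofit (n : Int) (prices : List Int) : Int :=
  let indexes : PySem.Dict Int Int :=
    (PySem.List.pyRange 0 ((prices.length : Int) - 1) 1).foldl
      (fun d i =>
        let maxprofitsofar :=
          (PySem.List.pyRange (i + 1) (prices.length : Int) 1).foldl
            (fun m j => max m (PySem.List.pyGetD prices j 0 - PySem.List.pyGetD prices i 0)) 0
        d.insert i maxprofitsofar)
      PySem.Dict.empty
  indexes.items.foldl (fun s p => s + p.2) 0

-- ===== PORT B =====
def bigprofit_alt (n : Int) (prices : List Int) : Int :=
  (prices.reverse.foldl
    (fun st p =>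
      match st.2 with
      | some m => (st.1 + max 0 (m - p), some (max m p))
      | none   => (st.1, some p))
    ((0 : Int), (none : Option Int))).1

-- ===== PRECONDITION & SPEC =====
def Spec_bigprofit (n : Int) (prices : List Int) (out : Int) : Prop := out = bigprofit_alt n prices
instance (n : Int) (prices : List Int) (out : Int) : Decidable (Spec_bigprofit n prices out) := by unfold Spec_bigprofit; infer_instance

-- ===== CLAIM (what is proved, stated in full; the proofs are below) =====
def Claim_equal_bigprofit : Prop := ∀ (n : Int) (prices : List Int), Dom_bigprofit n prices → Spec_bigprofit n prices (bigprofit n prices)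

-- ===== LEMMAS AND PROOFS =====

-- suffix maximum (max of a nonempty list; 0 for [], unused there)
def pvMaxL : List Int → Int
  | [] => 0
  | x :: t => t.foldl max x

-- the common value: sum over i of max 0 (suffix-max after i − prices[i])
def pvF : List Int → Int
  | [] => 0
  | [_] => 0
  | x :: y :: t => max 0 (pvMaxL (y :: t) - x) + pvF (y :: t)

theorem pv_foldl_max_max (t : List Int) (a b : Int) :
    t.foldl max (max a b) = max a (t.foldl max b) := by
  induction t generalizing b with
  | nil => rfl
  | cons y t ih =>
      simp only [List.foldl_cons]
      rw [max_assoc, ih]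

theorem pv_inner_shift (t : List Int) (c a b : Int) :
    t.foldl (fun m y => max m (y - c)) (max a (b - c)) = max a (t.foldl max b - c) := by
  induction t generalizing b with
  | nil => rfl
  | cons y t ih =>
      simp only [List.foldl_cons]
      have : max (max a (b - c)) (y - c) = max a (max b y - c) := by
        omega
      rw [this, ih]

theorem pv_inner_eq (xs : List Int) (c : Int) (h : xs ≠ []) :
    xs.foldl (fun m y => max m (y - c)) 0 = max 0 (pvMaxL xs - c) := by
  cases xs with
  | nil => exact absurd rfl h
  | cons y t =>
      simp only [List.foldl_cons, pvMaxL]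
      calc t.foldl (fun m y => max m (y - c)) (max 0 (y - c))
          = max 0 (t.foldl max y - c) := pv_inner_shift t c 0 y

theorem pv_alt_state (xs : List Int) (h : xs ≠ []) :
    xs.reverse.foldl
      (fun st p =>
        match st.2 with
        | some m => (st.1 + max 0 (m - p), some (max m p))
        | none   => (st.1, some p))
      ((0 : Int), (none : Option Int)) = (pvF xs, some (pvMaxL xs)) := by
  induction xs with
  | nil => exact absurd rfl h
  | cons x t ih =>
      cases t with
      | nil => simp [pvF, pvMaxL]
      | cons y s =>
          have ht : (y :: s) ≠ [] := by simp
          rw [List.reverse_cons, List.foldl_append, ih ht]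
          simp only [List.foldl_cons, List.foldl_nil, pvF, pvMaxL]
          refine Prod.ext ?_ ?_
          · simp; ring
          · simp only
            rw [show s.foldl max (max x y) = max x (s.foldl max y) from pv_foldl_max_max s x y]
            rw [max_comm]

theorem pv_alt_eq (n : Int) (xs : List Int) : bigprofit_alt n xs = pvF xs := by
  cases xs with
  | nil => rfl
  | cons x t =>
      unfold bigprofit_alt
      rw [pv_alt_state (x :: t) (by simp)]

-- A as a plain sum over the outer range
def pvAsum (xs : List Int) : Int :=
  ((PySem.List.pyRange 0 ((xs.length : Int) - 1) 1).map
    (fun i => (xs.drop (i + 1).toNat).foldl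
      (fun m y => max m (y - PySem.List.pyGetD xs i 0)) 0)).sum

theorem pv_a_eq_sum (n : Int) (xs : List Int) : bigprofit n xs = pvAsum xs := by
  unfold bigprofit pvAsum
  dsimp only
  have hitems := PySem.Dict.items_foldl_insert_fresh
      (PySem.List.pyRange 0 ((xs.length : Int) - 1) 1) (fun i => i)
      (fun i => (PySem.List.pyRange (i + 1) (xs.length : Int) 1).foldl
          (fun m j => max m (PySem.List.pyGetD xs j 0 - PySem.List.pyGetD xs i 0)) 0)
      PySem.Dict.empty
      (by intro a _; simp [PySem.Dict.contains_empty])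
      (by simpa using PySem.List.nodup_pyRange_one (a := 0) (b := (xs.length : Int) - 1))
  dsimp only at hitems
  rw [hitems]
  rw [show (PySem.Dict.empty : PySem.Dict Int Int).items = [] from rfl]
  simp only [List.nil_append]
  rw [List.foldl_map, List.sum_eq_foldl, List.foldl_map]
  apply PySem.List.foldl_congr_mem
  intro acc i hi
  have h0 : (0:Int) ≤ i + 1 := by
    have := (PySem.List.mem_pyRange_one.mp hi).1
    omega
  have hin := PySem.List.foldl_pyRange_pyGetD' xs 0
    (f := fun m y => max m (y - PySem.List.pyGetD xs i 0)) (init := 0) (a := i + 1) h0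
  simp only at hin ⊢
  rw [hin]

theorem pv_asum_eq_F (xs : List Int) : pvAsum xs = pvF xs := by
  induction xs with
  | nil => rfl
  | cons x t ih =>
      cases t with
      | nil =>
          simp [pvAsum, pvF, PySem.List.pyRange_one_eq_nil]
      | cons y s =>
          unfold pvAsum
          have hlen : ((x :: y :: s).length : Int) - 1 = ((y :: s).length : Int) := by
            simp
          rw [hlen]
          have hpos : (0:Int) < ((y :: s).length : Int) := by
            exact_mod_cast Nat.succ_pos s.length
          rw [PySem.List.pyRange_one_cons hpos]
          simp only [List.map_cons, List.sum_cons]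
          have hhead :
              ((x :: y :: s).drop ((0:Int) + 1).toNat).foldl
                (fun m z => max m (z - PySem.List.pyGetD (x :: y :: s) 0 0)) 0
              = max 0 (pvMaxL (y :: s) - x) := by
            have : ((0:Int) + 1).toNat = 1 := rfl
            rw [this]
            simp only [List.drop_succ_cons, List.drop_zero]
            have hg : PySem.List.pyGetD (x :: y :: s) 0 0 = x := by
              simp
            rw [hg]
            exact pv_inner_eq (y :: s) x (by simp)
          rw [hhead]
          have htail :
              ((PySem.List.pyRange 1 ((y :: s).length : Int) 1).map
                (fun i => ((x :: y :: s).drop (i + 1).toNat).foldl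
                  (fun m z => max m (z - PySem.List.pyGetD (x :: y :: s) i 0)) 0)).sum
              = pvAsum (y :: s) := by
            unfold pvAsum
            rw [PySem.List.pyRange_one (a := 1), PySem.List.pyRange_one (a := 0)]
            have hL : (((y :: s).length : Int) - 1 - 0).toNat
                = (((y :: s).length : Int) - 1).toNat := by omega
            rw [hL]
            simp only [List.map_map]
            apply congrArg
            apply List.map_congr_left
            intro k hk
            simp only [Function.comp]
            have h1 : ((1:Int) + (k:Int) + 1).toNat = k + 2 := by omega
            have h2 : ((0:Int) + (k:Int) + 1).toNat = k + 1 := by omega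
            rw [h1, h2]
            have hg : PySem.List.pyGetD (x :: y :: s) (1 + (k:Int)) 0
                = PySem.List.pyGetD (y :: s) (0 + (k:Int)) 0 := by
              have e1 : (1:Int) + (k:Int) = ((k+1 : Nat) : Int) := by push_cast; ring
              have e2 : (0:Int) + (k:Int) = ((k : Nat) : Int) := by push_cast; ring
              rw [e1, e2, PySem.List.pyGetD_natCast, PySem.List.pyGetD_natCast]
              simp [List.getD]
            rw [hg]
            rfl
          simp only [zero_add]
          rw [htail, ih]
          rfl

-- ===== VERDICT (by name: the statement is the Claim_ definition above) =====
theorem bigprofit_spec : Claim_equal_bigprofit := by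
  intro n prices _
  unfold Spec_bigprofit
  rw [pv_a_eq_sum, pv_asum_eq_F, pv_alt_eq]
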